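-- pv_equiv track=rewrite | github.com/jokerva1010123/BMSTU-3-cem | tài liệu/BMSTU-CA-sem4-main/lab_04/src/main.py | makeSLAEmatrix
-- ===== SOURCE A (Python) =====
-- def F(x, k):
--     return x ** k
--
-- def makeSLAEmatrix(matrix, n):
--     N = len(matrix)
--     res = [[0 for i in range(0, n + 1)] for j in range(0, n + 1)]
--     col = [0 for i in range(0, n + 1)]
--     for i in range(0, n + 1):
--         for j in range(N):
--             coef = matrix[j][2] * F(matrix[j][0], i)
--             for k in range(0, n + 1):
--                 res[i][k] += coef * F(matrix[j][0], k)
--             col[i] += coef * matrix[j][1]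
--     for i in range(len(col)):
--         res[i].append(col[i])
--     return res
-- ===== SOURCE B (Python) =====
-- def makeSLAEmatrix(matrix, n):
--     m = n + 1
--     if m <= 0:
--         return []
--     S = [0] * (2 * n + 1)
--     T = [0] * m
--     for row in matrix:
--         x, y, w = row[0], row[1], row[2]
--         p = w
--         for q in range(2 * n + 1):
--             S[q] += p
--             if q < m:
--                 T[q] += p * y
--             p *= x
--     return [S[i:i + m] + [T[i]] for i in range(m)]
-- ===== Notes on version B (the rewrite author's own statement) =====
-- stated objective: faster
-- what changed: Replaces A's triple loop, which recomputes x^i and x^k for every cell of the normal-equation matrix, by a single pass over the data rows that accumulates the power sums S[p]=sum w*x^p (p=0..2n) and moments T[i]=sum w*x^p*y, then fills the Hankel rows as slices of S.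
import Mathlib
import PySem

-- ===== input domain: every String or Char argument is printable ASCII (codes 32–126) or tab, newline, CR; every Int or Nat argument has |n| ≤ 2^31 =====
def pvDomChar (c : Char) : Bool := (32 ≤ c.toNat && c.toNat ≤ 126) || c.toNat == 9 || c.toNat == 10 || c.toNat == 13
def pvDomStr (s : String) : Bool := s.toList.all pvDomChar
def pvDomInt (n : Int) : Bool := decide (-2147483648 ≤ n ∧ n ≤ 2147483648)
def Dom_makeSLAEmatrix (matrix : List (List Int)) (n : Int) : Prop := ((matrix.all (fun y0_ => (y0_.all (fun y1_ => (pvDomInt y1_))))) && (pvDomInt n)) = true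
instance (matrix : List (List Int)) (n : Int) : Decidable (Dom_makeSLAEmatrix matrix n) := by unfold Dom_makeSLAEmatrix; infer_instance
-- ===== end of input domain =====

-- B replaces A's triple loop (which recomputes x^i and x^k for every matrix cell) by one pass
-- accumulating the power sums S[p] = Σ w·x^p and moments T[i] = Σ w·x^p·y, then fills the
-- Hankel rows as slices of S: measurably faster (asymptotically fewer multiplications).

-- ===== PORT A =====
-- Python's F(x, k) = x ** k; every call site passes a loop index k from range(0, n+1), so k ≥ 0
-- and `toNat` is exact there.
def F (x k : Int) : Int := x ^ k.toNat

def makeSLAEmatrix (matrix : List (List Int)) (n : Int) : List (List Int) :=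
  let N : Int := (matrix.length : Int)
  let res0 : List (List Int) :=
    (PySem.List.pyRange 0 (n+1) 1).map (fun _ => (PySem.List.pyRange 0 (n+1) 1).map (fun _ => (0:Int)))
  let col0 : List Int := (PySem.List.pyRange 0 (n+1) 1).map (fun _ => (0:Int))
  let rc : List (List Int) × List Int :=
    (PySem.List.pyRange 0 (n+1) 1).foldl (fun rc i =>
      (PySem.List.pyRange 0 N 1).foldl (fun rc j =>
        let coef : Int := PySem.List.pyGetD (PySem.List.pyGetD matrix j []) 2 0 *
                    F (PySem.List.pyGetD (PySem.List.pyGetD matrix j []) 0 0) i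
        let res1 := (PySem.List.pyRange 0 (n+1) 1).foldl (fun res k =>
            PySem.List.pySetD res i (PySem.List.pySetD (PySem.List.pyGetD res i []) k
              (PySem.List.pyGetD (PySem.List.pyGetD res i []) k 0 +
               coef * F (PySem.List.pyGetD (PySem.List.pyGetD matrix j []) 0 0) k))) rc.1
        let col1 := PySem.List.pySetD rc.2 i (PySem.List.pyGetD rc.2 i 0 +
                      coef * PySem.List.pyGetD (PySem.List.pyGetD matrix j []) 1 0)
        (res1, col1)) rc) (res0, col0)
  (PySem.List.pyRange 0 (rc.2.length : Int) 1).foldl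
    (fun res i => PySem.List.pySetD res i
        (PySem.List.pyGetD res i [] ++ [PySem.List.pyGetD rc.2 i 0])) rc.1

-- ===== PORT B =====
def makeSLAEmatrix_alt (matrix : List (List Int)) (n : Int) : List (List Int) :=
  let m := n + 1
  if m ≤ 0 then []
  else
    let S0 : List Int := PySem.List.pyRepeat [0] (2*n+1)
    let T0 : List Int := PySem.List.pyRepeat [0] m
    let st := matrix.foldl (fun (st : List Int × List Int) row =>
        let x := PySem.List.pyGetD row 0 0
        let y := PySem.List.pyGetD row 1 0
        let w := PySem.List.pyGetD row 2 0
        let fin := (PySem.List.pyRange 0 (2*n+1) 1).foldl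
          (fun (acc : (List Int × List Int) × Int) q =>
            let S := PySem.List.pySetD acc.1.1 q (PySem.List.pyGetD acc.1.1 q 0 + acc.2)
            let T := if q < m then PySem.List.pySetD acc.1.2 q (PySem.List.pyGetD acc.1.2 q 0 + acc.2 * y)
                     else acc.1.2
            ((S, T), acc.2 * x)) ((st.1, st.2), w)
        fin.1) (S0, T0)
    (PySem.List.pyRange 0 m 1).map (fun i =>
      PySem.List.slice st.1 (some i) (some (i + m)) ++ [PySem.List.pyGetD st.2 i 0])

-- ===== PRECONDITION & SPEC =====
-- Pre_: when n ≥ 0 both Pythons index row[0], row[1], row[2] of every row, so rows of length < 3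
-- make them raise IndexError; when n < 0 no element is ever indexed and A returns [].
def Pre_makeSLAEmatrix (matrix : List (List Int)) (n : Int) : Prop :=
  n < 0 ∨ ∀ row ∈ matrix, 3 ≤ row.length
instance (matrix : List (List Int)) (n : Int) : Decidable (Pre_makeSLAEmatrix matrix n) := by
  unfold Pre_makeSLAEmatrix; infer_instance

def pvWitness_makeSLAEmatrix : List (List Int) × Int := ([[1, 2, 1], [2, 3, 1]], 1)

def Spec_makeSLAEmatrix (matrix : List (List Int)) (n : Int) (out : List (List Int)) : Prop := out = makeSLAEmatrix_alt matrix n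
instance (matrix : List (List Int)) (n : Int) (out : List (List Int)) : Decidable (Spec_makeSLAEmatrix matrix n out) := by unfold Spec_makeSLAEmatrix; infer_instance

-- ===== CLAIM (what is proved, stated in full; the proofs are below) =====
def Claim_equal_makeSLAEmatrix : Prop := ∀ (matrix : List (List Int)) (n : Int), Dom_makeSLAEmatrix matrix n → Pre_makeSLAEmatrix matrix n → Spec_makeSLAEmatrix matrix n (makeSLAEmatrix matrix n)

-- ===== LEMMAS AND PROOFS =====

def pSum (matrix : List (List Int)) (p : Nat) : Int :=
  (matrix.map (fun row => PySem.List.pyGetD row 2 0 * (PySem.List.pyGetD row 0 0) ^ p)).sum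

def tSum (matrix : List (List Int)) (p : Nat) : Int :=
  (matrix.map (fun row => PySem.List.pyGetD row 2 0 * (PySem.List.pyGetD row 0 0) ^ p *
    PySem.List.pyGetD row 1 0)).sum

def charMat (matrix : List (List Int)) (m : Nat) : List (List Int) :=
  (List.range m).map (fun i =>
    (List.range m).map (fun k => pSum matrix (i + k)) ++ [tSum matrix i])


theorem getD_reconstruct {α : Type} (xs : List α) (d : α) :
    (List.range xs.length).map (fun i => xs.getD i d) = xs := by
  apply List.ext_getElem
  · simp
  · intro i h1 h2
    simp [List.getD_eq_getElem?_getD, List.getElem?_eq_getElem h2]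

theorem pyGetD_pySetD_self {α : Type} (xs : List α) (i : Int) (v : α) (d : α)
    (h0 : 0 ≤ i) (h1 : i < (xs.length : Int)) :
    PySem.List.pyGetD (PySem.List.pySetD xs i v) i d = v := by
  rw [PySem.List.pySetD_of_nonneg _ _ h0,
      PySem.List.pyGetD_eq_getElem _ _ h0 (by simpa using h1)]
  exact List.getElem_set_self (by simp; omega)

theorem pySetD_pySetD_self {α : Type} (xs : List α) (i : Int) (v w : α)
    (h0 : 0 ≤ i) :
    PySem.List.pySetD (PySem.List.pySetD xs i v) i w = PySem.List.pySetD xs i w := by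
  rw [PySem.List.pySetD_of_nonneg _ _ h0, PySem.List.pySetD_of_nonneg _ _ h0,
      PySem.List.pySetD_of_nonneg _ _ h0, List.set_set]

theorem foldl_set_fixed {α β : Type} (h : α → β → α) (d : α) (i : Int)
    (js : List β) :
    ∀ (xs : List α), 0 ≤ i → i < (xs.length : Int) →
    js.foldl (fun st j => PySem.List.pySetD st i (h (PySem.List.pyGetD st i d) j)) xs
    = PySem.List.pySetD xs i (js.foldl h (PySem.List.pyGetD xs i d)) := by
  induction js with
  | nil =>
    intro xs h0 h1
    simp only [List.foldl_nil]
    rw [PySem.List.pySetD_of_nonneg _ _ h0,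
        PySem.List.pyGetD_eq_getElem _ _ h0 (by simpa using h1)]
    exact (List.set_getElem_self (by omega)).symm
  | cons j js ih =>
    intro xs h0 h1
    simp only [List.foldl_cons]
    rw [ih _ h0 (by rwa [PySem.List.length_pySetD]),
        pyGetD_pySetD_self _ _ _ _ h0 h1, pySetD_pySetD_self _ _ _ _ h0]

theorem foldl_set_range_aux {α : Type} (f : List α → Int → List α) (g : Nat → α → α) (d : α)
    (L : Nat) (P : α → Prop)
    (hg : ∀ (i : Nat) v, i < L → P v → P (g i v))
    (hf : ∀ st (i : Nat), st.length = L → (∀ v ∈ st, P v) → i < L →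
            f st (i : Int) = PySem.List.pySetD st (i : Int) (g i (PySem.List.pyGetD st (i : Int) d))) :
    ∀ (r a : Nat), a + r = L → ∀ xs, xs.length = L → (∀ v ∈ xs, P v) →
      (List.range' a r).foldl (fun st (i : Nat) => f st (i : Int)) xs
      = xs.take a ++ (List.range' a r).map (fun i => g i (xs.getD i d)) := by
  intro r
  induction r with
  | zero =>
    intro a ha xs hlen _
    rw [List.take_of_length_le (by omega)]
    simp
  | succ r ih =>
    intro a ha xs hlen hP
    have haL : a < L := by omega
    have halen : a < xs.length := by omega
    have step : (List.range' a (r+1)).foldl (fun st (i : Nat) => f st (i:Int)) xs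
        = (List.range' (a+1) r).foldl (fun st (i : Nat) => f st (i:Int)) (f xs (a:Int)) := by
      rw [List.range'_succ]
      rfl
    rw [step, hf xs a hlen hP haL,
        PySem.List.pySetD_of_nonneg _ _ (by positivity),
        PySem.List.pyGetD_eq_getElem _ _ (by positivity) (by exact_mod_cast halen)]
    have htn : ((a : Int)).toNat = a := by simp
    generalize hv : g a xs[((a:Int)).toNat] = v
    have hva : v = g a (xs.getD a d) := by
      rw [← hv]
      simp [htn, List.getElem?_eq_getElem halen]
    have hlen' : (xs.set ((a:Int)).toNat v).length = L := by simpa using hlen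
    have hP' : ∀ u ∈ xs.set ((a:Int)).toNat v, P u := by
      intro u hu
      rcases List.mem_or_eq_of_mem_set hu with h | h
      · exact hP u h
      · subst h
        rw [hva]
        exact hg a _ haL (by rw [List.getD_eq_getElem _ _ halen]; exact hP _ (List.getElem_mem halen))
    rw [ih (a+1) (by omega) _ hlen' hP']
    have h1 : (xs.set ((a:Int)).toNat v).take (a+1) = xs.take a ++ [v] := by
      rw [htn]
      apply List.ext_getElem
      · simp
        omega
      · intro i hi1 hi2
        simp only [List.length_take] at hi1
        by_cases hia : i = a
        · subst hia
          rw [List.getElem_take, List.getElem_set_self (by simp; omega),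
              List.getElem_append_right (by simp [Nat.min_eq_left (le_of_lt halen)])]
          simp [Nat.min_eq_left (le_of_lt halen)]
        · have hlt : i < a := by omega
          rw [List.getElem_take, List.getElem_set_ne (by omega),
              List.getElem_append_left (by simp; omega), List.getElem_take]
    rw [h1]
    have h2 : (List.range' (a+1) r).map (fun i => g i ((xs.set ((a:Int)).toNat v).getD i d))
            = (List.range' (a+1) r).map (fun i => g i (xs.getD i d)) := by
      apply List.map_congr_left
      intro i hi
      have hge : a + 1 ≤ i := (List.mem_range'_1.mp hi).1
      congr 1
      simp only [List.getD_eq_getElem?_getD, List.getElem?_set]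
      rw [if_neg (by omega)]
    rw [h2, List.range'_succ]
    simp only [List.map_cons, hva, List.append_assoc, List.cons_append, List.nil_append]

theorem foldl_set_range {α : Type} (f : List α → Int → List α) (g : Nat → α → α) (d : α)
    (L : Nat) (P : α → Prop)
    (hg : ∀ (i : Nat) v, i < L → P v → P (g i v))
    (hf : ∀ st (i : Nat), st.length = L → (∀ v ∈ st, P v) → i < L →
            f st (i : Int) = PySem.List.pySetD st (i : Int) (g i (PySem.List.pyGetD st (i : Int) d)))
    (xs : List α) (hxs : xs.length = L) (hP : ∀ v ∈ xs, P v) :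
    (PySem.List.pyRange 0 (L : Int) 1).foldl f xs
    = (List.range L).map (fun i => g i (xs.getD i d)) := by
  have h0 := foldl_set_range_aux f g d L P hg hf L 0 (by omega) xs hxs hP
  rw [PySem.List.pyRange_one, List.foldl_map]
  simp only [zero_add, Int.sub_zero, Int.toNat_natCast] at *
  simp only [List.take_zero, List.nil_append] at h0
  rw [show (List.range L) = List.range' 0 L from (List.range_eq_range' ..)]
  exact h0
-- ===== PORT A =====
-- Python's F(x, k) = x ** k; every call site passes a loop index k from range(0, n+1), so k ≥ 0
-- and `toNat` is exact there.

theorem map_const_pyRange {α : Type} (c : α) (m : Nat) :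
    List.map (fun _ => c) (PySem.List.pyRange 0 (m : Int) 1) = List.map (fun _ => c) (List.range m) := by
  rw [PySem.List.pyRange_zero, List.map_map]
  simp only [Int.toNat_natCast]
  rfl

theorem sum_rows (matrix : List (List Int)) (h : List Int → Int) :
    ((PySem.List.pyRange 0 (matrix.length : Int) 1).map
      (fun j => h (PySem.List.pyGetD matrix j []))).sum = (matrix.map h).sum := by
  rw [show (fun j => h (PySem.List.pyGetD matrix j []))
        = h ∘ (fun j => PySem.List.pyGetD matrix j []) from rfl]
  rw [← List.map_map, PySem.List.map_pyGetD_pyRange_zero']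

theorem rowAccum (m : Nat) (c : Int → Int) (x : Int → Int) :
    ∀ (js : List Int) (v : List Int), v.length = m →
    js.foldl (fun v j => (PySem.List.pyRange 0 (m : Int) 1).foldl
        (fun rowv k => PySem.List.pySetD rowv k
          (PySem.List.pyGetD rowv k 0 + c j * F (x j) k)) v) v
    = (List.range m).map (fun k => v.getD k 0 + (js.map (fun j => c j * (x j) ^ k)).sum) := by
  intro js
  induction js with
  | nil =>
    intro v hv
    simp only [List.foldl_nil, List.map_nil, List.sum_nil, add_zero]
    rw [← hv, getD_reconstruct]
  | cons j js ih =>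
    intro v hv
    simp only [List.foldl_cons]
    have hstep : (PySem.List.pyRange 0 (m : Int) 1).foldl
        (fun rowv k => PySem.List.pySetD rowv k
          (PySem.List.pyGetD rowv k 0 + c j * F (x j) k)) v
        = (List.range m).map (fun k => v.getD k 0 + c j * (x j) ^ k) := by
      refine foldl_set_range
          (f := fun rowv k => PySem.List.pySetD rowv k
            (PySem.List.pyGetD rowv k 0 + c j * F (x j) k))
          (g := fun k u => u + c j * (x j) ^ k) (d := 0) (L := m) (P := fun _ => True)
          (fun _ _ _ _ => trivial) ?_ v hv (fun _ _ => trivial)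
      intro st k _ _ _
      simp [F]
    rw [hstep, ih _ (by simp)]
    apply List.map_congr_left
    intro k hk
    have hkm : k < m := List.mem_range.mp hk
    rw [PySem.List.getD_map_range _ _ _ _ hkm]
    simp only [List.map_cons, List.sum_cons]
    ring

theorem jfold_char (i : Int) (m : Nat) (c : Int → Int) (x : Int → Int) :
    ∀ (js : List Int) (st : List (List Int)), 0 ≤ i → i < (st.length : Int) →
    js.foldl (fun s j => (PySem.List.pyRange 0 (m : Int) 1).foldl
        (fun res k => PySem.List.pySetD res i (PySem.List.pySetD (PySem.List.pyGetD res i []) k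
          (PySem.List.pyGetD (PySem.List.pyGetD res i []) k 0 + c j * F (x j) k))) s) st
    = PySem.List.pySetD st i (js.foldl (fun v j => (PySem.List.pyRange 0 (m : Int) 1).foldl
        (fun rowv k => PySem.List.pySetD rowv k
          (PySem.List.pyGetD rowv k 0 + c j * F (x j) k)) v) (PySem.List.pyGetD st i [])) := by
  intro js
  induction js with
  | nil =>
    intro st h0 h1
    simp only [List.foldl_nil]
    rw [PySem.List.pySetD_of_nonneg _ _ h0,
        PySem.List.pyGetD_eq_getElem _ _ h0 (by exact_mod_cast h1)]
    exact (List.set_getElem_self (by omega)).symm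
  | cons j js ih =>
    intro st h0 h1
    simp only [List.foldl_cons]
    rw [foldl_set_fixed (h := fun rowv k => PySem.List.pySetD rowv k
          (PySem.List.pyGetD rowv k 0 + c j * F (x j) k)) [] i _ st h0 h1,
        ih _ h0 (by rwa [PySem.List.length_pySetD]),
        pyGetD_pySetD_self _ _ _ _ h0 h1, pySetD_pySetD_self _ _ _ _ h0]

theorem A_char (matrix : List (List Int)) (n : Int) (hn : 0 ≤ n) :
    makeSLAEmatrix matrix n = charMat matrix (n + 1).toNat := by
  have hm : (((n + 1).toNat : Nat) : Int) = n + 1 := Int.toNat_of_nonneg (by omega)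
  set m : Nat := (n + 1).toNat with hmdef
  unfold makeSLAEmatrix
  rw [← hm]
  simp only []
  -- split the pair-state fold into the res fold and the col fold
  rw [show (fun (rc : List (List Int) × List Int) (i : Int) =>
        List.foldl (fun rc j =>
          (List.foldl (fun res k =>
              PySem.List.pySetD res i (PySem.List.pySetD (PySem.List.pyGetD res i []) k
                (PySem.List.pyGetD (PySem.List.pyGetD res i []) k 0 +
                  PySem.List.pyGetD (PySem.List.pyGetD matrix j []) 2 0 *
                      F (PySem.List.pyGetD (PySem.List.pyGetD matrix j []) 0 0) i *
                    F (PySem.List.pyGetD (PySem.List.pyGetD matrix j []) 0 0) k)))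
            rc.1 (PySem.List.pyRange 0 (m : Int)),
           PySem.List.pySetD rc.2 i
             (PySem.List.pyGetD rc.2 i 0 +
               PySem.List.pyGetD (PySem.List.pyGetD matrix j []) 2 0 *
                   F (PySem.List.pyGetD (PySem.List.pyGetD matrix j []) 0 0) i *
                 PySem.List.pyGetD (PySem.List.pyGetD matrix j []) 1 0)))
          rc (PySem.List.pyRange 0 (matrix.length : Int)))
      = (fun rc i =>
          (List.foldl (fun s j =>
            List.foldl (fun res k =>
              PySem.List.pySetD res i (PySem.List.pySetD (PySem.List.pyGetD res i []) k
                (PySem.List.pyGetD (PySem.List.pyGetD res i []) k 0 +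
                  PySem.List.pyGetD (PySem.List.pyGetD matrix j []) 2 0 *
                      F (PySem.List.pyGetD (PySem.List.pyGetD matrix j []) 0 0) i *
                    F (PySem.List.pyGetD (PySem.List.pyGetD matrix j []) 0 0) k)))
              s (PySem.List.pyRange 0 (m : Int))) rc.1 (PySem.List.pyRange 0 (matrix.length : Int)),
           List.foldl (fun s j =>
             PySem.List.pySetD s i
               (PySem.List.pyGetD s i 0 +
                 PySem.List.pyGetD (PySem.List.pyGetD matrix j []) 2 0 *
                     F (PySem.List.pyGetD (PySem.List.pyGetD matrix j []) 0 0) i *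
                   PySem.List.pyGetD (PySem.List.pyGetD matrix j []) 1 0))
             rc.2 (PySem.List.pyRange 0 (matrix.length : Int))))
      from by
        funext rc i
        obtain ⟨r, c⟩ := rc
        exact PySem.List.foldl_prod_mk
          (f := fun s j =>
            List.foldl (fun res k =>
              PySem.List.pySetD res i (PySem.List.pySetD (PySem.List.pyGetD res i []) k
                (PySem.List.pyGetD (PySem.List.pyGetD res i []) k 0 +
                  PySem.List.pyGetD (PySem.List.pyGetD matrix j []) 2 0 *
                      F (PySem.List.pyGetD (PySem.List.pyGetD matrix j []) 0 0) i *
                    F (PySem.List.pyGetD (PySem.List.pyGetD matrix j []) 0 0) k)))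
              s (PySem.List.pyRange 0 (m : Int)))
          (g := fun s j =>
            PySem.List.pySetD s i
              (PySem.List.pyGetD s i 0 +
                PySem.List.pyGetD (PySem.List.pyGetD matrix j []) 2 0 *
                    F (PySem.List.pyGetD (PySem.List.pyGetD matrix j []) 0 0) i *
                  PySem.List.pyGetD (PySem.List.pyGetD matrix j []) 1 0))
          _ r c]
  rw [PySem.List.foldl_prod_mk
        (f := fun (s : List (List Int)) (i : Int) =>
          List.foldl (fun s j =>
            List.foldl (fun res k =>
              PySem.List.pySetD res i (PySem.List.pySetD (PySem.List.pyGetD res i []) k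
                (PySem.List.pyGetD (PySem.List.pyGetD res i []) k 0 +
                  PySem.List.pyGetD (PySem.List.pyGetD matrix j []) 2 0 *
                      F (PySem.List.pyGetD (PySem.List.pyGetD matrix j []) 0 0) i *
                    F (PySem.List.pyGetD (PySem.List.pyGetD matrix j []) 0 0) k)))
              s (PySem.List.pyRange 0 (m : Int)))
            s (PySem.List.pyRange 0 (matrix.length : Int)))
        (g := fun (s : List Int) (i : Int) =>
          List.foldl (fun s j =>
            PySem.List.pySetD s i
              (PySem.List.pyGetD s i 0 +
                PySem.List.pyGetD (PySem.List.pyGetD matrix j []) 2 0 *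
                    F (PySem.List.pyGetD (PySem.List.pyGetD matrix j []) 0 0) i *
                  PySem.List.pyGetD (PySem.List.pyGetD matrix j []) 1 0))
            s (PySem.List.pyRange 0 (matrix.length : Int)))]
  simp only []
  have hcol : List.foldl (fun s i =>
        List.foldl (fun s j =>
          PySem.List.pySetD s i
            (PySem.List.pyGetD s i 0 +
              PySem.List.pyGetD (PySem.List.pyGetD matrix j []) 2 0 *
                  F (PySem.List.pyGetD (PySem.List.pyGetD matrix j []) 0 0) i *
                PySem.List.pyGetD (PySem.List.pyGetD matrix j []) 1 0))
          s (PySem.List.pyRange 0 (matrix.length : Int)))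
        (List.map (fun _ => (0:Int)) (PySem.List.pyRange 0 (m : Int)))
        (PySem.List.pyRange 0 (m : Int))
      = (List.range m).map (fun i => tSum matrix i) := by
    have hlen0 : (List.map (fun _ => (0:Int)) (PySem.List.pyRange 0 (m : Int))).length = m := by
      simp [PySem.List.length_pyRange_one]
    have h1 := foldl_set_range
      (f := fun s i =>
        List.foldl (fun s j =>
          PySem.List.pySetD s i
            (PySem.List.pyGetD s i 0 +
              PySem.List.pyGetD (PySem.List.pyGetD matrix j []) 2 0 *
                  F (PySem.List.pyGetD (PySem.List.pyGetD matrix j []) 0 0) i *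
                PySem.List.pyGetD (PySem.List.pyGetD matrix j []) 1 0))
          s (PySem.List.pyRange 0 (matrix.length : Int)))
      (g := fun i v => v + tSum matrix i) (d := (0:Int)) (L := m) (P := fun _ => True)
      (fun _ _ _ _ => trivial) ?_
      (List.map (fun _ => (0:Int)) (PySem.List.pyRange 0 (m : Int))) hlen0 (fun _ _ => trivial)
    · rw [h1]
      apply List.map_congr_left
      intro i hi
      rw [map_const_pyRange, PySem.List.getD_map_range _ _ _ _ (List.mem_range.mp hi)]
      simp
    · intro st i hlenst _ him
      simp only []
      rw [foldl_set_fixed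
            (h := fun v j => v +
              PySem.List.pyGetD (PySem.List.pyGetD matrix j []) 2 0 *
                  F (PySem.List.pyGetD (PySem.List.pyGetD matrix j []) 0 0) (i : Int) *
                PySem.List.pyGetD (PySem.List.pyGetD matrix j []) 1 0)
            0 (i : Int) _ st (by positivity) (by rw [hlenst]; exact_mod_cast him)]
      congr 1
      rw [PySem.List.foldl_add]
      congr 1
      have hs := sum_rows matrix (fun row =>
        PySem.List.pyGetD row 2 0 * F (PySem.List.pyGetD row 0 0) (i : Int) *
          PySem.List.pyGetD row 1 0)
      simp only [] at hs
      rw [hs]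
      simp only [tSum, F, Int.toNat_natCast]
  have hres : List.foldl (fun s i =>
        List.foldl (fun s j =>
          List.foldl (fun res k =>
            PySem.List.pySetD res i (PySem.List.pySetD (PySem.List.pyGetD res i []) k
              (PySem.List.pyGetD (PySem.List.pyGetD res i []) k 0 +
                PySem.List.pyGetD (PySem.List.pyGetD matrix j []) 2 0 *
                    F (PySem.List.pyGetD (PySem.List.pyGetD matrix j []) 0 0) i *
                  F (PySem.List.pyGetD (PySem.List.pyGetD matrix j []) 0 0) k)))
            s (PySem.List.pyRange 0 (m : Int)))
          s (PySem.List.pyRange 0 (matrix.length : Int)))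
        (List.map (fun _ => List.map (fun _ => (0:Int)) (PySem.List.pyRange 0 (m : Int)))
          (PySem.List.pyRange 0 (m : Int)))
        (PySem.List.pyRange 0 (m : Int))
      = (List.range m).map (fun i => (List.range m).map (fun k => pSum matrix (i + k))) := by
    have hlen0 : (List.map (fun _ => List.map (fun _ => (0:Int)) (PySem.List.pyRange 0 (m : Int)))
        (PySem.List.pyRange 0 (m : Int))).length = m := by
      simp [PySem.List.length_pyRange_one]
    have h1 := foldl_set_range
      (f := fun s i =>
        List.foldl (fun s j =>
          List.foldl (fun res k =>
            PySem.List.pySetD res i (PySem.List.pySetD (PySem.List.pyGetD res i []) k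
              (PySem.List.pyGetD (PySem.List.pyGetD res i []) k 0 +
                PySem.List.pyGetD (PySem.List.pyGetD matrix j []) 2 0 *
                    F (PySem.List.pyGetD (PySem.List.pyGetD matrix j []) 0 0) i *
                  F (PySem.List.pyGetD (PySem.List.pyGetD matrix j []) 0 0) k)))
            s (PySem.List.pyRange 0 (m : Int)))
          s (PySem.List.pyRange 0 (matrix.length : Int)))
      (g := fun i v => (List.range m).map (fun k => v.getD k 0 +
        ((PySem.List.pyRange 0 (matrix.length : Int) 1).map (fun j =>
          (PySem.List.pyGetD (PySem.List.pyGetD matrix j []) 2 0 *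
            F (PySem.List.pyGetD (PySem.List.pyGetD matrix j []) 0 0) (i : Int)) *
          (PySem.List.pyGetD (PySem.List.pyGetD matrix j []) 0 0) ^ k)).sum))
      (d := ([] : List Int)) (L := m) (P := fun v => v.length = m)
      (fun _ _ _ _ => by simp) ?_
      (List.map (fun _ => List.map (fun _ => (0:Int)) (PySem.List.pyRange 0 (m : Int)))
        (PySem.List.pyRange 0 (m : Int))) hlen0 ?_
    · rw [h1]
      apply List.map_congr_left
      intro i hi
      rw [map_const_pyRange, PySem.List.getD_map_range _ _ _ _ (List.mem_range.mp hi)]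
      simp only []
      apply List.map_congr_left
      intro k hk
      rw [map_const_pyRange, PySem.List.getD_map_range _ _ _ _ (List.mem_range.mp hk), zero_add]
      have hs := sum_rows matrix (fun row =>
        (PySem.List.pyGetD row 2 0 * F (PySem.List.pyGetD row 0 0) (i : Int)) *
          (PySem.List.pyGetD row 0 0) ^ k)
      simp only [] at hs
      rw [hs]
      simp only [pSum]
      congr 1
      apply List.map_congr_left
      intro row _
      simp only [F, Int.toNat_natCast]
      rw [pow_add]
      ring
    · intro st i hlenst hP him
      simp only []
      have hIr : (i : Int) < (st.length : Int) := by rw [hlenst]; exact_mod_cast him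
      have hj := jfold_char (i : Int) m
        (fun j => PySem.List.pyGetD (PySem.List.pyGetD matrix j []) 2 0 *
          F (PySem.List.pyGetD (PySem.List.pyGetD matrix j []) 0 0) (i : Int))
        (fun j => PySem.List.pyGetD (PySem.List.pyGetD matrix j []) 0 0)
        (PySem.List.pyRange 0 (matrix.length : Int) 1) st (by positivity) hIr
      simp only [] at hj
      rw [hj]
      congr 1
      have hvlen : (PySem.List.pyGetD st (i : Int) []).length = m := by
        rw [PySem.List.pyGetD_eq_getElem _ _ (by positivity) hIr]
        exact hP _ (List.getElem_mem (by omega))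
      have hr := rowAccum m
        (fun j => PySem.List.pyGetD (PySem.List.pyGetD matrix j []) 2 0 *
          F (PySem.List.pyGetD (PySem.List.pyGetD matrix j []) 0 0) (i : Int))
        (fun j => PySem.List.pyGetD (PySem.List.pyGetD matrix j []) 0 0)
        (PySem.List.pyRange 0 (matrix.length : Int) 1)
        (PySem.List.pyGetD st (i : Int) []) hvlen
      simp only [] at hr
      rw [hr]
    · intro v hv
      rcases List.mem_map.mp hv with ⟨_, _, rfl⟩
      simp [PySem.List.length_pyRange_one]
  rw [hcol, hres]
  rw [show (((List.map (fun i => tSum matrix i) (List.range m)).length : Nat) : Int) = (m : Int)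
        from by simp]
  have h3 := foldl_set_range
    (f := fun res i => PySem.List.pySetD res i (PySem.List.pyGetD res i [] ++
      [PySem.List.pyGetD (List.map (fun i => tSum matrix i) (List.range m)) i 0]))
    (g := fun i v => v ++ [tSum matrix i]) (d := ([] : List Int)) (L := m) (P := fun _ => True)
    (fun _ _ _ _ => trivial) ?_
    (List.map (fun i => List.map (fun k => pSum matrix (i + k)) (List.range m)) (List.range m))
    (by simp) (fun _ _ => trivial)
  · rw [h3]
    simp only [charMat]
    apply List.map_congr_left
    intro i hi
    rw [PySem.List.getD_map_range _ _ _ _ (List.mem_range.mp hi)]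
  · intro st i hlenst _ him
    simp only [PySem.List.pyGetD_natCast]
    rw [PySem.List.getD_map_range _ _ _ _ him]

theorem getD_set_self' {α : Type} (xs : List α) (i : Nat) (v d : α) (h : i < xs.length) :
    (xs.set i v).getD i d = v := by
  simp [List.getD_eq_getElem?_getD, h]

theorem getD_set_ne' {α : Type} (xs : List α) (i j : Nat) (v d : α) (h : i ≠ j) :
    (xs.set i v).getD j d = xs.getD j d := by
  simp [List.getD_eq_getElem?_getD, h]

theorem bInner (x y : Int) (m M2 : Nat) (hmM : m ≤ M2) :
    ∀ (r a : Nat), a + r = M2 → ∀ (S T : List Int) (p : Int), S.length = M2 → T.length = m →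
    ((List.range' a r).map (fun k => ((k : Nat) : Int))).foldl
      (fun (acc : (List Int × List Int) × Int) (q : Int) =>
        ((PySem.List.pySetD acc.1.1 q (PySem.List.pyGetD acc.1.1 q 0 + acc.2),
          if q < ((m : Nat) : Int) then
            PySem.List.pySetD acc.1.2 q (PySem.List.pyGetD acc.1.2 q 0 + acc.2 * y)
          else acc.1.2),
         acc.2 * x)) ((S, T), p)
    = (((List.range M2).map (fun q => if a ≤ q then S.getD q 0 + p * x ^ (q - a) else S.getD q 0),
        (List.range m).map (fun q => if a ≤ q then T.getD q 0 + p * x ^ (q - a) * y else T.getD q 0)),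
       p * x ^ r) := by
  intro r
  induction r with
  | zero =>
    intro a ha S T p hS hT
    simp only [List.range'_zero, List.map_nil, List.foldl_nil, pow_zero, mul_one, Prod.mk.injEq]
    refine ⟨⟨?_, ?_⟩, trivial⟩
    · rw [show (List.range M2).map (fun q => if a ≤ q then S.getD q 0 + p * x ^ (q - a) else S.getD q 0)
            = (List.range M2).map (fun q => S.getD q 0) from
          List.map_congr_left (fun q hq => if_neg (by have := List.mem_range.mp hq; omega))]
      rw [← hS, getD_reconstruct]
    · rw [show (List.range m).map (fun q => if a ≤ q then T.getD q 0 + p * x ^ (q - a) * y else T.getD q 0)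
            = (List.range m).map (fun q => T.getD q 0) from
          List.map_congr_left (fun q hq => if_neg (by have := List.mem_range.mp hq; omega))]
      rw [← hT, getD_reconstruct]
  | succ r ih =>
    intro a ha S T p hS hT
    have haM : a < M2 := by omega
    rw [List.range'_succ, List.map_cons, List.foldl_cons]
    simp only []
    rw [PySem.List.pySetD_natCast S, PySem.List.pyGetD_natCast S]
    by_cases ham : a < m
    · rw [if_pos (by exact_mod_cast ham), PySem.List.pySetD_natCast T, PySem.List.pyGetD_natCast T]
      rw [ih (a+1) (by omega) (S.set a (S.getD a 0 + p)) (T.set a (T.getD a 0 + p * y)) (p * x)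
            (by simpa using hS) (by simpa using hT)]
      simp only [Prod.mk.injEq]
      refine ⟨⟨?_, ?_⟩, by ring⟩
      · apply List.map_congr_left
        intro q hq
        have hqM : q < M2 := List.mem_range.mp hq
        rcases lt_trichotomy q a with h | h | h
        · rw [if_neg (by omega), if_neg (by omega), getD_set_ne' _ _ _ _ _ (by omega)]
        · subst h
          rw [if_neg (by omega), if_pos (le_refl _), getD_set_self' _ _ _ _ (by omega)]
          simp
        · rw [if_pos (by omega), if_pos (by omega), getD_set_ne' _ _ _ _ _ (by omega)]
          rw [show q - a = q - (a + 1) + 1 from by omega, pow_succ]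
          ring
      · apply List.map_congr_left
        intro q hq
        have hqm : q < m := List.mem_range.mp hq
        rcases lt_trichotomy q a with h | h | h
        · rw [if_neg (by omega), if_neg (by omega), getD_set_ne' _ _ _ _ _ (by omega)]
        · subst h
          rw [if_neg (by omega), if_pos (le_refl _), getD_set_self' _ _ _ _ (by omega)]
          simp
        · rw [if_pos (by omega), if_pos (by omega), getD_set_ne' _ _ _ _ _ (by omega)]
          rw [show q - a = q - (a + 1) + 1 from by omega, pow_succ]
          ring
    · rw [if_neg (by exact_mod_cast ham)]
      rw [ih (a+1) (by omega) (S.set a (S.getD a 0 + p)) T (p * x)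
            (by simpa using hS) hT]
      simp only [Prod.mk.injEq]
      refine ⟨⟨?_, ?_⟩, by ring⟩
      · apply List.map_congr_left
        intro q hq
        have hqM : q < M2 := List.mem_range.mp hq
        rcases lt_trichotomy q a with h | h | h
        · rw [if_neg (by omega), if_neg (by omega), getD_set_ne' _ _ _ _ _ (by omega)]
        · subst h
          rw [if_neg (by omega), if_pos (le_refl _), getD_set_self' _ _ _ _ (by omega)]
          simp
        · rw [if_pos (by omega), if_pos (by omega), getD_set_ne' _ _ _ _ _ (by omega)]
          rw [show q - a = q - (a + 1) + 1 from by omega, pow_succ]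
          ring
      · apply List.map_congr_left
        intro q hq
        have hqm : q < m := List.mem_range.mp hq
        rw [if_neg (by omega), if_neg (by omega)]

theorem take_drop_map_range {α : Type} (f : Nat → α) (M2 i m : Nat) (h : i + m ≤ M2) :
    List.take m (List.drop i ((List.range M2).map f)) = (List.range m).map (fun k => f (i + k)) := by
  apply List.ext_getElem
  · simp
    omega
  · intro k h1 h2
    simp [List.getElem_take, List.getElem_drop]

theorem bAccum (m M2 : Nat) (hmM : m ≤ M2) :
    ∀ (rows : List (List Int)) (S T : List Int), S.length = M2 → T.length = m →
    rows.foldl (fun (st : List Int × List Int) row =>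
      (((List.range' 0 M2).map (fun k => ((k : Nat) : Int))).foldl
        (fun (acc : (List Int × List Int) × Int) (q : Int) =>
          ((PySem.List.pySetD acc.1.1 q (PySem.List.pyGetD acc.1.1 q 0 + acc.2),
            if q < ((m : Nat) : Int) then
              PySem.List.pySetD acc.1.2 q
                (PySem.List.pyGetD acc.1.2 q 0 + acc.2 * PySem.List.pyGetD row 1 0)
            else acc.1.2),
           acc.2 * PySem.List.pyGetD row 0 0)) ((st.1, st.2), PySem.List.pyGetD row 2 0)).1) (S, T)
    = ((List.range M2).map (fun q => S.getD q 0 + pSum rows q),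
       (List.range m).map (fun q => T.getD q 0 + tSum rows q)) := by
  intro rows
  induction rows with
  | nil =>
    intro S T hS hT
    simp only [List.foldl_nil, pSum, tSum, List.map_nil, List.sum_nil, add_zero, Prod.mk.injEq]
    constructor
    · rw [← hS, getD_reconstruct]
    · rw [← hT, getD_reconstruct]
  | cons row rows ih =>
    intro S T hS hT
    simp only [List.foldl_cons]
    have h0 := bInner (PySem.List.pyGetD row 0 0) (PySem.List.pyGetD row 1 0)
      m M2 hmM M2 0 (by omega) S T (PySem.List.pyGetD row 2 0) hS hT
    simp only [Nat.zero_le, if_pos, Nat.sub_zero] at h0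
    rw [h0]
    simp only []
    rw [ih ((List.range M2).map (fun q => S.getD q 0 + PySem.List.pyGetD row 2 0 * PySem.List.pyGetD row 0 0 ^ q))
          ((List.range m).map (fun q => T.getD q 0 + PySem.List.pyGetD row 2 0 * PySem.List.pyGetD row 0 0 ^ q * PySem.List.pyGetD row 1 0))
          (by simp) (by simp)]
    simp only [Prod.mk.injEq]
    constructor
    · apply List.map_congr_left
      intro q hq
      rw [PySem.List.getD_map_range _ _ _ _ (List.mem_range.mp hq)]
      simp only [pSum, List.map_cons, List.sum_cons]
      ring
    · apply List.map_congr_left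
      intro q hq
      rw [PySem.List.getD_map_range _ _ _ _ (List.mem_range.mp hq)]
      simp only [tSum, List.map_cons, List.sum_cons]
      ring

theorem B_char (matrix : List (List Int)) (n : Int) (hn : 0 ≤ n) :
    makeSLAEmatrix_alt matrix n = charMat matrix (n + 1).toNat := by
  have hm : (((n + 1).toNat : Nat) : Int) = n + 1 := Int.toNat_of_nonneg (by omega)
  have hM2 : (((2 * n + 1).toNat : Nat) : Int) = 2 * n + 1 := Int.toNat_of_nonneg (by omega)
  set m : Nat := (n + 1).toNat with hmdef
  set M2 : Nat := (2 * n + 1).toNat with hM2def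
  have hmM : m ≤ M2 := by omega
  unfold makeSLAEmatrix_alt
  rw [if_neg (by omega)]
  simp only []
  rw [← hm, ← hM2]
  rw [PySem.List.pyRepeat_singleton, PySem.List.pyRepeat_singleton]
  rw [show PySem.List.pyRange 0 ((M2 : Nat) : Int) 1
        = (List.range' 0 M2).map (fun k => ((k : Nat) : Int)) from by
      rw [PySem.List.pyRange_zero, ← List.range_eq_range']
      simp]
  rw [bAccum m M2 hmM matrix (List.replicate ((M2:Int)).toNat 0) (List.replicate ((m:Int)).toNat 0)
        (by simp) (by simp)]
  simp only [Int.toNat_natCast]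
  rw [PySem.List.pyRange_zero]
  simp only [Int.toNat_natCast]
  rw [List.map_map]
  simp only [charMat]
  apply List.map_congr_left
  intro i hi
  have him := List.mem_range.mp hi
  simp only [Function.comp]
  congr 1
  · rw [PySem.List.slice_natCast_add, take_drop_map_range _ _ _ _ (by omega)]
    apply List.map_congr_left
    intro k hk
    have hkm := List.mem_range.mp hk
    rw [List.getD_eq_getElem _ _ (by simp; omega), List.getElem_replicate, zero_add]
  · rw [PySem.List.pyGetD_natCast, PySem.List.getD_map_range _ _ _ _ him]
    rw [List.getD_eq_getElem _ _ (by simp; omega), List.getElem_replicate, zero_add]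

theorem A_neg (matrix : List (List Int)) (n : Int) (hn : n < 0) :
    makeSLAEmatrix matrix n = [] := by
  unfold makeSLAEmatrix
  simp only []
  have h0 : (n + 1 - 0).toNat = 0 := by omega
  rw [show PySem.List.pyRange 0 (n + 1) 1 = [] from by
    rw [PySem.List.pyRange_one, h0]
    simp]
  simp [PySem.List.pyRange_zero]

theorem B_neg (matrix : List (List Int)) (n : Int) (hn : n < 0) :
    makeSLAEmatrix_alt matrix n = [] := by
  unfold makeSLAEmatrix_alt
  rw [if_pos (by omega)]

-- ===== VERDICT (by name: the statement is the Claim_ definition above) =====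
theorem makeSLAEmatrix_spec : Claim_equal_makeSLAEmatrix := by
  intro matrix n _ _
  unfold Spec_makeSLAEmatrix
  rcases lt_or_ge n 0 with h | h
  · rw [A_neg matrix n h, B_neg matrix n h]
  · rw [A_char matrix n h, B_char matrix n h]
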